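-- pv_equiv track=rewrite | github.com/garethellis0/Advent-Of-Code | day_5/day_5.py | contains_3_vowels
-- ===== SOURCE A (Python) =====
-- def contains_3_vowels(line):
--     vowels = ['a', 'e', 'i', 'o', 'u']
--     vowel_count = 0
--
--     for char in line:
--         if char in vowels:
--             vowel_count += 1
--             if vowel_count >= 3:
--                 return True
--
--     return False
-- ===== SOURCE B (Python) =====
-- def contains_3_vowels(line):
--     return sum(line.count(v) for v in 'aeiou') >= 3
-- ===== Notes on version B (the rewrite author's own statement) =====
-- stated objective: idiomatic
-- what changed: Replaces the explicit loop with accumulator and early exit by summing five per-vowel str.count passes and comparing the total to 3.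
import Mathlib
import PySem

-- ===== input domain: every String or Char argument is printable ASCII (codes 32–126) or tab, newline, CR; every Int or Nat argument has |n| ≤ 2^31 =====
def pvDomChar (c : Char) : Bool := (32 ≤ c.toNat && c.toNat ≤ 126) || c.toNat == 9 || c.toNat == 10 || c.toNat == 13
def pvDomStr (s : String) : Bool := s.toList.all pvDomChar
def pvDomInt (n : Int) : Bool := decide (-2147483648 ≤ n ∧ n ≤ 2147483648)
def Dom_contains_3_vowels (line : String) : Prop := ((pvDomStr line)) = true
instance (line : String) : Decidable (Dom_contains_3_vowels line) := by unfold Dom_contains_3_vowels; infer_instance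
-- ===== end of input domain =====

-- B replaces A's explicit loop/accumulator/early-exit by summing per-vowel count passes (idiomatic; same cost).

-- ===== PORT A =====
-- A's loop: walk the characters keeping vowel_count, early-return True at 3.
def c3vGo : List Char → Nat → Bool
  | [], _ => false
  | c :: rest, k =>
    if c ∈ ['a', 'e', 'i', 'o', 'u'] then
      if k + 1 ≥ 3 then true else c3vGo rest (k + 1)
    else c3vGo rest k

def contains_3_vowels (line : String) : Bool := c3vGo line.toList 0

-- ===== PORT B =====
-- B: sum(line.count(v) for v in 'aeiou') >= 3
def contains_3_vowels_alt (line : String) : Bool :=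
  decide (3 ≤ ("aeiou".toList.map (fun v => PySem.Str.count line (String.ofList [v]))).sum)

-- ===== PRECONDITION & SPEC =====
def Spec_contains_3_vowels (line : String) (out : Bool) : Prop := out = contains_3_vowels_alt line
instance (line : String) (out : Bool) : Decidable (Spec_contains_3_vowels line out) := by unfold Spec_contains_3_vowels; infer_instance

-- ===== CLAIM (what is proved, stated in full; the proofs are below) =====
def Claim_equal_contains_3_vowels : Prop := ∀ (line : String), Dom_contains_3_vowels line → Spec_contains_3_vowels line (contains_3_vowels line)

-- ===== LEMMAS AND PROOFS =====

-- single-character substring count is List.count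
theorem count_go_singleton (c : Char) (s : List Char) (fuel acc : Nat)
    (h : s.length ≤ fuel) :
    PySem.Chars.count.go [c] fuel s acc = acc + s.count c := by
  induction s generalizing fuel acc with
  | nil => cases fuel <;> simp [PySem.Chars.count.go]
  | cons hd t ih =>
    cases fuel with
    | zero => simp at h
    | succ f =>
      have ht : t.length ≤ f := by simpa using h
      by_cases hc : c = hd
      · subst hc
        simp [PySem.Chars.count.go, List.isPrefixOf, ih _ _ ht, List.count_cons]
        omega
      · have hpre : ([c].isPrefixOf (hd :: t)) = false := by
          simp [List.isPrefixOf, hc]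
        simp [PySem.Chars.count.go, hpre, ih _ _ ht, List.count_cons, Ne.symm hc]

theorem chars_count_singleton (s : List Char) (c : Char) :
    PySem.Chars.count s [c] = s.count c := by
  simp [PySem.Chars.count]
  simpa using count_go_singleton c s s.length 0 le_rfl

-- A's loop computes "total vowel count reaches 3"
theorem c3vGo_eq (cs : List Char) (k : Nat) (hk : k < 3) :
    c3vGo cs k = decide (3 ≤ k + cs.countP (fun c => c ∈ (['a','e','i','o','u'] : List Char))) := by
  induction cs generalizing k with
  | nil => simp [c3vGo]; omega
  | cons c rest ih =>
    by_cases hv : c ∈ (['a','e','i','o','u'] : List Char)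
    · have hv' : c = 'a' ∨ c = 'e' ∨ c = 'i' ∨ c = 'o' ∨ c = 'u' := by simpa using hv
      by_cases h3 : k + 1 ≥ 3
      · have hk2 : k = 2 := by omega
        subst hk2
        simp [c3vGo, hv, List.countP_cons, h3, hv']
        omega
      · have : k + 1 < 3 := by omega
        simp [c3vGo, hv, h3, ih (k + 1) this, List.countP_cons, hv']
        constructor <;> intro <;> omega
    · have hv' : ¬ (c = 'a' ∨ c = 'e' ∨ c = 'i' ∨ c = 'o' ∨ c = 'u') := by simpa using hv
      simp [c3vGo, hv, ih k hk, List.countP_cons, hv']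

-- the five per-vowel counts sum to the vowel countP
theorem sum_counts_eq_countP (cs : List Char) :
    (("aeiou".toList).map (fun v => cs.count v)).sum
      = cs.countP (fun c => c ∈ (['a','e','i','o','u'] : List Char)) := by
  induction cs with
  | nil => simp
  | cons c rest ih =>
    by_cases h1 : c = 'a' <;> by_cases h2 : c = 'e' <;> by_cases h3 : c = 'i' <;>
      by_cases h4 : c = 'o' <;> by_cases h5 : c = 'u' <;>
        simp_all [List.count_cons, List.countP_cons] <;> omega

-- ===== VERDICT (by name: the statement is the Claim_ definition above) =====
theorem contains_3_vowels_spec : Claim_equal_contains_3_vowels := by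
  intro line _
  unfold Spec_contains_3_vowels contains_3_vowels contains_3_vowels_alt
  have hB : ("aeiou".toList.map (fun v => PySem.Str.count line (String.ofList [v]))).sum
      = line.toList.countP (fun c => c ∈ (['a','e','i','o','u'] : List Char)) := by
    rw [← sum_counts_eq_countP line.toList]
    congr 1
    apply List.map_congr_left
    intro v _
    have : PySem.Str.count line (String.ofList [v]) = PySem.Chars.count line.toList [v] := by
      simp [PySem.Str.count_eq, String.toList_ofList]
    rw [this, chars_count_singleton]
  rw [c3vGo_eq line.toList 0 (by omega), hB]
  simp
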